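-- pv_equiv track=rewrite | github.com/nziegler87/FoundationsOfCompSci | Homework/HW4/football_functions.py | compile_streaks
-- ===== SOURCE A (Python) =====
-- def compile_streaks(result_list):
--     ''' Name: compile_streaks
--         Input: list of results, each item a string
--         Returns: string of results with streaks combined
--     '''
--     list_length = len(result_list)
--     count = 1
--     streak_list = []
--
--     # Iterate through each item in result_list
--     for i in range(len(result_list)):
--
--         # Set potential item or streak to be added to temp string
--         streak = (str(count) + result_list[i])
--
--         # Iterate through every item in list, except last one
--         if i < (list_length - 1):
--
--             # Account for chance that list has only one item
--             if list_length == 1: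
--                 streak_list.append(streak)
--
--             # Update streak count if current item equals next
--             elif result_list[i] == result_list[(i + 1)]:
--                 count += 1
--
--             # If current item != next, append current streak or item
--             else:
--                 streak_list.append(streak)
--                 count = 1
--
--         # Append either last item or current streak
--         else:
--             streak_list.append(streak)
--
--     # Call convert_to_string to join items in list as a string
--     final_string = convert_to_string(streak_list)
--
--     return final_string
--
-- def convert_to_string(original_list):
--     ''' Name: convert_to_string
--         Input: list of strings
--         Returns: list of strings joined as one string
--     '''
--     # Set blank string
--     output_string = ""
--
--     # Iterate over list of strings, adding each to blank string
--     for i in range(len(original_list)):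
--         if i < (len(original_list) - 1):
--             output_string += (original_list[i] + " ")
--         else:
--             output_string += (original_list[i])
--
--     return output_string
-- ===== SOURCE B (Python) =====
-- def compile_streaks(result_list):
--     ''' Run-length encode result_list: split it into maximal runs of equal
--         consecutive items, render each run as str(length)+item, join with spaces.
--     '''
--     tokens = []
--     i = 0
--     n = len(result_list)
--     while i < n:
--         head = result_list[i]
--         j = i + 1
--         while j < n and result_list[j] == head:
--             j += 1
--         tokens.append(str(j - i) + head)
--         i = j
--     return " ".join(tokens)
-- ===== Notes on version B (the rewrite author's own statement) =====
-- stated objective: idiomatic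
-- what changed: A's single-index loop with a running count, lookahead comparison result_list[i]==result_list[i+1] and a manual string-concatenation join helper is replaced by grouping the list into maximal runs of consecutive equal items (inner scan + slicing off each run) rendered as str(len)+item and joined with " ".join.
import Mathlib
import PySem

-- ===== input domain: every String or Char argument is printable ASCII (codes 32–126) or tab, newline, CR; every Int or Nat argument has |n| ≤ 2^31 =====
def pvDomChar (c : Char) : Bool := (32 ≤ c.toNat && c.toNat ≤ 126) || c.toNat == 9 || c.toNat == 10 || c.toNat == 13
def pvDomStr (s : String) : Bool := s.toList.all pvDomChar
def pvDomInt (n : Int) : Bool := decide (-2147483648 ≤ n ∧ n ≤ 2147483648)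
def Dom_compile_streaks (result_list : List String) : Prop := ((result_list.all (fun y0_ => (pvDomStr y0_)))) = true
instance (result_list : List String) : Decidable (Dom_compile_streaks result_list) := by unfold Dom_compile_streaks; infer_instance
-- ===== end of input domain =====

-- B replaces A's index loop with running count (plus a manual join helper) by a
-- span-based grouping into maximal runs joined with " ".join; objective: idiomatic.

-- ===== PORT A =====
-- helper convert_to_string: literal port of the += loop over range(len)
def convert_to_string (original_list : List String) : String :=
  (PySem.List.pyRange 0 (original_list.length : Int) 1).foldl
    (fun output_string i =>
      if i < (original_list.length : Int) - 1 then
        output_string ++ (PySem.List.pyGetD original_list i "" ++ " ")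
      else
        output_string ++ PySem.List.pyGetD original_list i "")
    ""

-- loop body of A's for-loop; state = (count, streak_list).
-- result_list[i] / result_list[i+1] are ported with pyGetD: every access is at an
-- index the branch guard keeps in range (i ∈ range(n), and i+1 only when i < n-1),
-- so Python never raises and pyGetD is exact here.
def bodyA (result_list : List String) (st : Int × List String) (i : Int) : Int × List String :=
  let count := st.1
  let streak_list := st.2
  let streak := PySem.Int.toStr count ++ PySem.List.pyGetD result_list i ""
  if i < (result_list.length : Int) - 1 then
    if (result_list.length : Int) = 1 then (count, streak_list ++ [streak])
    else if PySem.List.pyGetD result_list i "" == PySem.List.pyGetD result_list (i + 1) "" then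
      (count + 1, streak_list)
    else (1, streak_list ++ [streak])
  else (count, streak_list ++ [streak])

def compile_streaks (result_list : List String) : String :=
  let st := (PySem.List.pyRange 0 (result_list.length : Int) 1).foldl (bodyA result_list) (1, [])
  convert_to_string st.2

-- ===== PORT B =====
-- tokens of B's outer while loop, as structural recursion on the suffix
-- result_list[i:]: head = result_list[i]; the inner `while j < n and
-- result_list[j] == head` scan is takeWhile on the tail (run.length = j - i - 1),
-- and `i = j` advances to the suffix after the run (drop).
def altTokens (rest : List String) : List String :=
  match rest with
  | [] => []
  | head :: tl =>
    let run := tl.takeWhile (fun x => x == head)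
    (PySem.Int.toStr (1 + (run.length : Int)) ++ head) :: altTokens (tl.drop run.length)
termination_by rest.length
decreasing_by
  simp only [List.length_drop, List.length_cons]
  omega

def compile_streaks_alt (result_list : List String) : String :=
  PySem.Str.join " " (altTokens result_list)

-- ===== PRECONDITION & SPEC =====
def Spec_compile_streaks (result_list : List String) (out : String) : Prop := out = compile_streaks_alt result_list
instance (result_list : List String) (out : String) : Decidable (Spec_compile_streaks result_list out) := by unfold Spec_compile_streaks; infer_instance

-- ===== CLAIM (what is proved, stated in full; the proofs are below) =====
def Claim_equal_compile_streaks : Prop := ∀ (result_list : List String), Dom_compile_streaks result_list → Spec_compile_streaks result_list (compile_streaks result_list)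

-- ===== LEMMAS AND PROOFS =====

-- recursive characterisation of A's loop output (the streak_list it appends)
def tokensFrom (c : Int) : List String → List String
  | [] => []
  | [x] => [PySem.Int.toStr c ++ x]
  | x :: y :: t =>
    if x == y then tokensFrom (c + 1) (y :: t)
    else (PySem.Int.toStr c ++ x) :: tokensFrom 1 (y :: t)

theorem getD_append_len (pre : List String) (x : String) (ys : List String) (d : String) :
    (pre ++ x :: ys).getD pre.length d = x := by
  induction pre with
  | nil => rfl
  | cons p ps ih => simp only [List.cons_append, List.length_cons, List.getD_cons_succ]; exact ih

theorem len_lt (pre : List String) (x : String) (r : List String) :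
    (pre.length : Int) < ((pre ++ x :: r).length : Int) := by
  simp only [List.length_append, List.length_cons]; omega

theorem pvAux (pre : List String) (x y : String) (r : List String) :
    ¬ ((pre ++ x :: y :: r).length : Int) = 1 := by
  simp only [List.length_append, List.length_cons]
  omega

theorem len_lt_sub (pre : List String) (x y : String) (r : List String) :
    (pre.length : Int) < ((pre ++ x :: y :: r).length : Int) - 1 := by
  simp only [List.length_append, List.length_cons]; omega

-- String-level join lemmas
theorem sjoin_nil : PySem.Str.join " " [] = "" := by
  rw [← String.toList_inj]
  simp [PySem.Str.toList_join, PySem.Chars.join_nil]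

theorem sjoin_singleton (x : String) : PySem.Str.join " " [x] = x := by
  rw [← String.toList_inj]
  simp [PySem.Str.toList_join, PySem.Chars.join_singleton]

theorem sjoin_cons_cons (x y : String) (t : List String) :
    PySem.Str.join " " (x :: y :: t) = (x ++ " ") ++ PySem.Str.join " " (y :: t) := by
  rw [← String.toList_inj]
  simp [PySem.Str.toList_join, PySem.Chars.join_cons_cons]

-- convert_to_string's fold, generalized over a processed prefix, is a join
theorem conv_loop (ys : List String) : ∀ (pre : List String) (s : String),
    (PySem.List.pyRange (pre.length : Int) (((pre ++ ys).length : Int)) 1).foldl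
      (fun output_string i =>
        if i < ((pre ++ ys).length : Int) - 1 then
          output_string ++ (PySem.List.pyGetD (pre ++ ys) i "" ++ " ")
        else
          output_string ++ PySem.List.pyGetD (pre ++ ys) i "")
      s
    = s ++ PySem.Str.join " " ys := by
  induction ys with
  | nil =>
    intro pre s
    rw [PySem.List.pyRange_one_eq_nil (by simp)]
    simp [sjoin_nil]
  | cons x t ih =>
    intro pre s
    cases t with
    | nil =>
      rw [PySem.List.pyRange_one_cons (len_lt pre x [])]
      rw [show ((pre.length : Int) + 1) = ((pre ++ [x]).length : Int) from by simp,
        PySem.List.pyRange_one_eq_nil (le_refl _)]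
      simp only [List.foldl_cons, List.foldl_nil]
      rw [if_neg (by simp), PySem.List.pyGetD_natCast, getD_append_len, sjoin_singleton]
    | cons y t' =>
      rw [PySem.List.pyRange_one_cons (len_lt pre x (y :: t'))]
      simp only [List.foldl_cons]
      rw [if_pos (len_lt_sub pre x y t'),
        PySem.List.pyGetD_natCast, getD_append_len]
      have hre : pre ++ x :: y :: t' = (pre ++ [x]) ++ y :: t' := by simp
      rw [hre, show ((pre.length : Int) + 1) = (((pre ++ [x]).length : Nat) : Int) from by simp,
        ih (pre ++ [x]) (s ++ (x ++ " "))]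
      rw [sjoin_cons_cons, String.append_assoc]

-- A's loop, generalized over a processed prefix, accumulates tokensFrom
theorem loopA (ys : List String) : ∀ (pre : List String) (c : Int) (acc : List String),
    ((PySem.List.pyRange (pre.length : Int) (((pre ++ ys).length : Int)) 1).foldl
      (bodyA (pre ++ ys)) (c, acc)).2
    = acc ++ tokensFrom c ys := by
  induction ys with
  | nil =>
    intro pre c acc
    rw [PySem.List.pyRange_one_eq_nil (by simp)]
    simp [tokensFrom]
  | cons x t ih =>
    intro pre c acc
    cases t with
    | nil =>
      rw [PySem.List.pyRange_one_cons (len_lt pre x [])]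
      rw [show ((pre.length : Int) + 1) = ((pre ++ [x]).length : Int) from by simp,
        PySem.List.pyRange_one_eq_nil (le_refl _)]
      simp only [List.foldl_cons, List.foldl_nil]
      unfold bodyA
      rw [if_neg (by simp)]
      simp only [PySem.List.pyGetD_natCast, getD_append_len]
      simp [tokensFrom]
    | cons y t' =>
      rw [PySem.List.pyRange_one_cons (len_lt pre x (y :: t'))]
      simp only [List.foldl_cons]
      have hy : (pre ++ x :: y :: t').getD (pre.length + 1) "" = y := by
        rw [show pre ++ x :: y :: t' = (pre ++ [x]) ++ y :: t' from by simp,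
          show pre.length + 1 = (pre ++ [x]).length from by simp]
        exact getD_append_len _ _ _ _
      have hstep : bodyA (pre ++ x :: y :: t') (c, acc) ((pre.length : Nat) : Int)
          = if x == y then (c + 1, acc) else (1, acc ++ [PySem.Int.toStr c ++ x]) := by
        unfold bodyA
        rw [if_pos (len_lt_sub pre x y t'),
          if_neg (pvAux pre x y t'),
          show ((pre.length : Int) + 1) = ((pre.length + 1 : Nat) : Int) from by push_cast; ring]
        simp only [PySem.List.pyGetD_natCast, getD_append_len, hy]
      rw [hstep]
      have hre : pre ++ x :: y :: t' = (pre ++ [x]) ++ y :: t' := by simp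
      by_cases hxy : x == y
      · rw [if_pos hxy, hre,
          show ((pre.length : Int) + 1) = (((pre ++ [x]).length : Nat) : Int) from by simp,
          ih (pre ++ [x]) (c + 1) acc]
        have hyx : x = y := by simpa using hxy
        simp [tokensFrom, hyx]
      · rw [if_neg hxy, hre,
          show ((pre.length : Int) + 1) = (((pre ++ [x]).length : Nat) : Int) from by simp,
          ih (pre ++ [x]) 1 (acc ++ [PySem.Int.toStr c ++ x])]
        have hxy' : ¬ (x == y) = true := by simpa using hxy
        simp [tokensFrom, hxy']

theorem drop_takeWhile (p : String → Bool) (l : List String) :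
    l.drop (l.takeWhile p).length = l.dropWhile p := by
  induction l with
  | nil => rfl
  | cons a l ih =>
    by_cases h : p a
    · simp [h, ih]
    · simp [h]

-- tokensFrom absorbs the whole leading run into its count
theorem tokensFrom_run (xs : List String) : ∀ (c : Int) (x : String),
    tokensFrom c (x :: xs)
    = (PySem.Int.toStr (c + ((xs.takeWhile (fun z => z == x)).length : Int)) ++ x)
        :: tokensFrom 1 (xs.dropWhile (fun z => z == x)) := by
  induction xs with
  | nil => intro c x; simp [tokensFrom]
  | cons y t ih =>
    intro c x
    by_cases hxy : x == y
    · have hyx : y = x := by simpa using (by simpa [BEq.comm] using hxy : (y == x) = true)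
      rw [show tokensFrom c (x :: y :: t) = tokensFrom (c + 1) (y :: t) from by
        simp [tokensFrom, hxy]]
      rw [ih (c + 1) y]
      subst hyx
      simp []
      ring_nf
    · have hne : x ≠ y := by simpa using hxy
      have hyx : (y == x) = false := beq_eq_false_iff_ne.mpr (Ne.symm hne)
      have h1 : tokensFrom c (x :: y :: t)
          = (PySem.Int.toStr c ++ x) :: tokensFrom 1 (y :: t) := by
        simp [tokensFrom, hxy]
      rw [h1]
      simp [hyx]

theorem tokensFrom_eq_altTokens (xs : List String) : tokensFrom 1 xs = altTokens xs := by
  induction hn : xs.length using Nat.strong_induction_on generalizing xs with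
  | _ n ih =>
    match xs with
    | [] => simp [tokensFrom, altTokens]
    | x :: tl =>
      rw [tokensFrom_run]
      simp only [altTokens]
      rw [drop_takeWhile]
      congr 1
      apply ih ((tl.dropWhile (fun z => z == x)).length)
      · subst hn
        have := List.length_dropWhile_le (fun z => z == x) tl
        simp only [List.length_cons]
        omega
      · rfl

-- convert_to_string is " ".join
theorem convert_to_string_eq_join (sl : List String) :
    convert_to_string sl = PySem.Str.join " " sl := by
  have := conv_loop sl [] ""
  simp only [List.nil_append, List.length_nil, Nat.cast_zero] at this
  unfold convert_to_string
  rw [this]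
  simp

-- ===== VERDICT (by name: the statement is the Claim_ definition above) =====
theorem compile_streaks_spec : Claim_equal_compile_streaks := by
  intro rl _
  unfold Spec_compile_streaks compile_streaks compile_streaks_alt
  have h := loopA rl [] 1 []
  simp only [List.nil_append, List.length_nil, Nat.cast_zero] at h
  simp only [h]
  rw [convert_to_string_eq_join, tokensFrom_eq_altTokens]
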